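-- pv_equiv track=rewrite | github.com/StatisticalReinforcementLearningLab/pooling_rl | simulation/sim_functions_cleaner.py | get_possible_keys
-- ===== SOURCE A (Python) =====
-- def get_possible_keys(context):
--
--
--     keys = []
--
--     #keys.append('-'.join([str(i) for i in context]))
--     for i in range(len(context)):
--         stop = len(context)-i
--         #for j in range(stop):
--         #if stop>=1:
--         key = '-'.join([str(context[j]) for j in range(stop)])
--
--         keys.append(key)
--     keys.append('{}-mean'.format(context[0]))
--     return keys
-- ===== SOURCE B (Python) =====
-- def get_possible_keys(context):
--     acc = str(context[0])
--     prefixes = [acc]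
--     for c in context[1:]:
--         acc = acc + '-' + str(c)
--         prefixes.append(acc)
--     prefixes.reverse()
--     prefixes.append('{}-mean'.format(context[0]))
--     return prefixes
-- ===== Notes on version B (the rewrite author's own statement) =====
-- stated objective: alternative
-- what changed: replaces the per-iteration re-join over a fresh range comprehension by a single accumulating pass that extends one running string, collects the growing prefixes and reverses them
import Mathlib
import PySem

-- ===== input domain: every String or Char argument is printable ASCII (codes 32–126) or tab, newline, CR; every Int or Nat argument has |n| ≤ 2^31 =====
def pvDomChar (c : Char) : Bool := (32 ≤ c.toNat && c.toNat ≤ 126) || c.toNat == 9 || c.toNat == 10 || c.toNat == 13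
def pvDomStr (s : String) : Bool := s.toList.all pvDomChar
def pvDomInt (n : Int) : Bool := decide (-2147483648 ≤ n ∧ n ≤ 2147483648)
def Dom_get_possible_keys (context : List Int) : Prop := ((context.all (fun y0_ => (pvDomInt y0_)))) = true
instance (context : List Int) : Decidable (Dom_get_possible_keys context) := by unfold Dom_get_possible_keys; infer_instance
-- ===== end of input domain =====

-- B builds each key incrementally in one accumulating pass instead of re-joining a fresh range comprehension per iteration.

-- ===== PORT A =====
def get_possible_keys (context : List Int) : List String :=
  let n : Int := context.length
  let keys := (PySem.List.pyRange 0 n 1).foldl (fun keys i =>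
    let stop := n - i
    -- the joined comprehension; the index j is always in range here
    let key := PySem.Str.join "-" ((PySem.List.pyRange 0 stop 1).map
      (fun j => PySem.Int.toStr (PySem.List.pyGetD context j 0)))
    keys ++ [key]) ([] : List String)
  -- the '{}-mean'.format(...) line: str of the first element + '-mean'; in range under Pre_
  keys ++ [PySem.Int.toStr (PySem.List.pyGetD context 0 0) ++ "-mean"]

-- ===== PORT B =====
def get_possible_keys_alt (context : List Int) : List String :=
  let acc0 := PySem.Int.toStr (PySem.List.pyGetD context 0 0)  -- str of the first element; in range under Pre_
  let res := (PySem.List.slice context (some 1) none).foldl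
    (fun (st : String × List String) c =>
      let a := st.1 ++ "-" ++ PySem.Int.toStr c
      (a, st.2 ++ [a])) (acc0, [acc0])
  res.2.reverse ++ [acc0 ++ "-mean"]

-- ===== PRECONDITION & SPEC =====
-- Pre_ excludes only the empty list, on which A raises IndexError at its final format line (B raises at its first line too).
def Pre_get_possible_keys (context : List Int) : Prop := context ≠ []
instance (context : List Int) : Decidable (Pre_get_possible_keys context) := by unfold Pre_get_possible_keys; infer_instance
def pvWitness_get_possible_keys : List Int := [3, -1, 4]

def Spec_get_possible_keys (context : List Int) (out : List String) : Prop := out = get_possible_keys_alt context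
instance (context : List Int) (out : List String) : Decidable (Spec_get_possible_keys context out) := by unfold Spec_get_possible_keys; infer_instance

-- ===== CLAIM (what is proved, stated in full; the proofs are below) =====
def Claim_equal_get_possible_keys : Prop := ∀ (context : List Int), Dom_get_possible_keys context → Pre_get_possible_keys context → Spec_get_possible_keys context (get_possible_keys context)

-- ===== LEMMAS AND PROOFS =====

-- the '-'-join of the string forms of the first m elements (the value of A's i-th key with m = n - i)
def pvJ (ctx : List Int) (m : Nat) : String :=
  PySem.Str.join "-" ((ctx.take m).map PySem.Int.toStr)

-- the list of partial strings B's loop appends when started with accumulator a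
def pvPref (a : String) : List Int → List String
  | [] => []
  | c :: cs => (a ++ "-" ++ PySem.Int.toStr c) :: pvPref (a ++ "-" ++ PySem.Int.toStr c) cs

theorem pvFold (cs : List Int) : ∀ (a : String) (ps : List String),
    (cs.foldl (fun (st : String × List String) c =>
      let a := st.1 ++ "-" ++ PySem.Int.toStr c
      (a, st.2 ++ [a])) (a, ps)).2 = ps ++ pvPref a cs := by
  induction cs with
  | nil => intro a ps; simp [pvPref]
  | cons c cs ih =>
      intro a ps
      simp only [List.foldl_cons, pvPref, ih]
      simp

theorem pvCharsJoinSnoc (sep p : List Char) :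
    ∀ (rest : List (List Char)) (q : List Char),
      PySem.Chars.join sep ((q :: rest) ++ [p]) =
        PySem.Chars.join sep (q :: rest) ++ sep ++ p := by
  intro rest
  induction rest with
  | nil => intro q; simp [PySem.Chars.join_cons_cons, PySem.Chars.join_singleton]
  | cons r rest ih =>
      intro q
      have h1 : (q :: r :: rest) ++ [p] = q :: r :: (rest ++ [p]) := by simp
      rw [h1, PySem.Chars.join_cons_cons, PySem.Chars.join_cons_cons sep q r,
        ← List.cons_append, ih r]
      simp [List.append_assoc]

theorem pvJoinSnoc (q p : String) (ps : List String) :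
    PySem.Str.join "-" ((q :: ps) ++ [p]) = PySem.Str.join "-" (q :: ps) ++ "-" ++ p := by
  apply String.toList_injective
  simp only [PySem.Str.toList_join, String.toList_append, List.map_append, List.map_cons,
    List.map_nil]
  exact pvCharsJoinSnoc _ _ _ _

theorem pvJ_succ (ctx : List Int) (m : Nat) (h1 : 1 ≤ m) (h2 : m < ctx.length) :
    pvJ ctx (m + 1) = pvJ ctx m ++ "-" ++ PySem.Int.toStr ctx[m] := by
  unfold pvJ
  rw [List.take_add_one, List.getElem?_eq_getElem h2]
  obtain ⟨y, ys, hy⟩ : ∃ y ys, (ctx.take m).map PySem.Int.toStr = y :: ys := by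
    have hl : ((ctx.take m).map PySem.Int.toStr).length = m := by
      simp [List.length_take]; omega
    cases hm : (ctx.take m).map PySem.Int.toStr with
    | nil => rw [hm] at hl; simp at hl; omega
    | cons y ys => exact ⟨y, ys, rfl⟩
  simp only [Option.toList_some, List.map_append, List.map_cons, List.map_nil, hy]
  exact pvJoinSnoc _ _ _

theorem pvJ_one (x : Int) (xs : List Int) : pvJ (x :: xs) 1 = PySem.Int.toStr x := by
  apply String.toList_injective
  simp [pvJ, PySem.Str.toList_join, PySem.Chars.join_singleton]

theorem pvPrefJ (ctx : List Int) :
    ∀ (d k : Nat), 1 ≤ k → ctx.length - k = d →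
      pvPref (pvJ ctx k) (ctx.drop k) =
        (List.range d).map (fun t => pvJ ctx (k + t + 1)) := by
  intro d
  induction d with
  | zero =>
      intro k _ hd
      rw [List.drop_eq_nil_of_le (by omega)]
      simp [pvPref]
  | succ d ih =>
      intro k hk hd
      have hlt : k < ctx.length := by omega
      rw [List.drop_eq_getElem_cons hlt]
      show (pvJ ctx k ++ "-" ++ PySem.Int.toStr ctx[k]) ::
          pvPref (pvJ ctx k ++ "-" ++ PySem.Int.toStr ctx[k]) (ctx.drop (k + 1)) = _
      rw [← pvJ_succ ctx k hk hlt, ih (k + 1) (by omega) (by omega),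
        List.range_succ_eq_map]
      simp only [List.map_cons, List.map_map, Nat.add_zero]
      congr 1
      apply List.map_congr_left
      intro t _
      simp only [Function.comp_apply]
      congr 1
      omega

theorem pvInner (ctx : List Int) (m : Nat) (hm : m ≤ ctx.length) :
    (PySem.List.pyRange 0 (m : Int) 1).map
        (fun j => PySem.Int.toStr (PySem.List.pyGetD ctx j 0)) =
      (ctx.take m).map PySem.Int.toStr := by
  rw [PySem.List.pyRange_one]
  apply List.ext_getElem
  · simp; omega
  · intro i h1 h2
    simp only [List.getElem_map, List.getElem_range]
    have hi : i < m := by simpa using h1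
    simp only [zero_add, PySem.List.pyGetD_natCast]
    rw [List.getD_eq_getElem _ _ (by omega), List.getElem_take]

theorem pvRevRange {α : Type} (n : Nat) (f : Nat → α) :
    ((List.range n).map f).reverse = (List.range n).map (fun i => f (n - 1 - i)) := by
  apply List.ext_getElem
  · simp
  · intro i h1 h2
    rw [List.getElem_reverse]
    simp

-- ===== VERDICT (by name: the statement is the Claim_ definition above) =====
theorem get_possible_keys_spec : Claim_equal_get_possible_keys := by
  intro context _ hpre
  obtain ⟨x, xs, rfl⟩ := List.exists_cons_of_ne_nil hpre
  simp only [Spec_get_possible_keys, get_possible_keys, get_possible_keys_alt,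
    PySem.List.slice_from_one, List.tail_cons, PySem.List.pyGetD_zero_cons,
    PySem.List.foldl_append_singleton_eq_map, List.nil_append]
  rw [pvFold]
  congr 1
  -- the prefix lists
  have hL : (x :: xs).length = xs.length + 1 := by simp
  -- B side as a map over a range
  have hB : [PySem.Int.toStr x] ++ pvPref (PySem.Int.toStr x) xs =
      (List.range (xs.length + 1)).map (fun k => pvJ (x :: xs) (k + 1)) := by
    rw [← pvJ_one x xs]
    have hp := pvPrefJ (x :: xs) xs.length 1 (by omega) (by simp)
    rw [List.drop_one, List.tail_cons] at hp
    rw [hp, List.range_succ_eq_map]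
    simp only [List.map_cons, List.map_map, List.singleton_append, Nat.zero_add]
    congr 1
    apply List.map_congr_left
    intro t _
    simp only [Function.comp_apply]
    congr 1
    omega
  rw [hB, pvRevRange, PySem.List.pyRange_one]
  simp only [List.map_map, Int.sub_zero, Int.toNat_natCast, hL]
  apply List.map_congr_left
  intro k hk
  simp only [Function.comp_apply, List.mem_range] at *
  have hcast : (((xs.length + 1 : Nat) : Int) - (0 + (k : Int))) = (((xs.length + 1 - k : Nat)) : Int) := by
    push_cast; omega
  rw [hcast, pvInner (x :: xs) (xs.length + 1 - k) (by simp only [List.length_cons]; omega)]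
  show pvJ (x :: xs) (xs.length + 1 - k) = pvJ (x :: xs) (xs.length + 1 - 1 - k + 1)
  congr 1
  omega
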